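-- pv_equiv track=rewrite | github.com/yalishoshan/CS-550-harvard | DFS.py | dfs
-- ===== SOURCE A (Python) =====
-- def dfs(tree, start, goal):
--     """
--     This function implements the depth first search
--
--     :param tree: the graph
--     :type tree: dict
--     :param start:
--     :type start: str
--     :param goal:
--     :type goal: str
--     :return: true if the goal is found, false otherwise
--     :rtype: bool
--     """
--     explored_set = set()    # Track visited nodes, prevents infinite loops
--     stack = [start]         # LIFO structure for depth-first exploration
--     if start == goal:       # Check if the start and goal are the same
--         return True         # Success
--
--     while stack:                           # Continue until no more nodes to explore
--         current = stack.pop()              # Get most recent node (LIFO behavior)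
--
--         if current in explored_set:        # Skip already visited nodes
--            continue                        # (prevents infinite loops)
--
--         if current == goal:                # Check if we found the target
--             return True                    # Success - path exists
--
--         if current not in explored_set:    # Only process unvisited nodes
--             explored_set.add(current)      # Mark current node as visited
--             for neighbor in tree[current]: # Check all adjacent nodes
--                 stack.append(neighbor)     # Add to stack for future exploration
--
--     return False                          # No path found - goal unreachable
-- ===== SOURCE B (Python) =====
-- def dfs(tree, start, goal):
--     """Recursive DFS reachability test: same visit order as the stack version
--     (neighbors taken in reversed order), explored set threaded through the recursion."""
--     explored = set()
--
--     def visit(node):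
--         if node == goal:
--             return True
--         if node in explored:
--             return False
--         explored.add(node)
--         return any(visit(nb) for nb in reversed(tree[node]))
--
--     return visit(start)
-- ===== Notes on version B (the rewrite author's own statement) =====
-- stated objective: alternative
-- what changed: Replaces the explicit LIFO stack and while-loop by a recursive visit function over the graph structure (explored set threaded through the recursion, neighbors taken in reversed order so the visit order matches the stack version).
-- outside the precondition, e.g. on dfs({'a': ['x', 'g']}, 'a', 'g'): A returns True, B returns True
import Mathlib
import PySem

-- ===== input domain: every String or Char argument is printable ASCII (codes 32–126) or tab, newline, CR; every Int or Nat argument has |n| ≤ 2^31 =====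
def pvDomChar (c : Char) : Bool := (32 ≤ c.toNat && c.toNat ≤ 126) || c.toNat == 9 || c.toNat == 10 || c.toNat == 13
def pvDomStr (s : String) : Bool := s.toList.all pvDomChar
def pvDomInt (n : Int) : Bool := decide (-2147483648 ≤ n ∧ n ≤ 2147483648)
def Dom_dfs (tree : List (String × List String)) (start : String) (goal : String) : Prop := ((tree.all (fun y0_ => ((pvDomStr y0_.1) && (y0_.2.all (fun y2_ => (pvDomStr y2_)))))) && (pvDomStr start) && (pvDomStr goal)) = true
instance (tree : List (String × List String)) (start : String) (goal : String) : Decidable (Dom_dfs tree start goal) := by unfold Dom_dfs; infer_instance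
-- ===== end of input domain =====

-- B replaces A's explicit LIFO stack + while-loop by a recursive visit function over the graph
-- (objective: alternative decomposition, same asymptotic cost; return-value equivalence only — neither side mutates its arguments).

-- ===== PORT A =====
-- A's while-loop. The stack is kept head-first (head = Python's end-of-list top: append k items = k.reverse ++ stack,
-- pop = head). The fuel bounds the number of loop iterations (each iteration strictly decreases
-- |stack| + total neighbour-list length of unexplored keys; see pvW below); it never runs out.
-- 'tree[current]' raises KeyError on a missing key: ported as getD _ [] — exact on Pre_dfs, which excludes the raising inputs.
def dfsLoop (tree : List (String × List String)) (goal : String) :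
    Nat → PySem.Set String → List String → Bool
  | _, _, [] => false                                    -- while stack: loop ends, return False
  | 0, _, _ :: _ => false                                -- fuel (never reached from dfs, see pvLoop_irr)
  | f+1, E, c :: S =>
    if PySem.Set.contains E c then dfsLoop tree goal f E S          -- if current in explored_set: continue
    else if c == goal then true                                      -- if current == goal: return True
    else if !(PySem.Set.contains E c) then                           -- if current not in explored_set:
      dfsLoop tree goal f (PySem.Set.add E c)
        (((PySem.Dict.mk tree).getD c []).reverse ++ S)              -- explored_set.add; push all neighbours
    else dfsLoop tree goal f E S                                     -- (unreachable: fall through the body)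

def dfs (tree : List (String × List String)) (start : String) (goal : String) : Bool :=
  -- explored_set = set(); stack = [start]
  if start == goal then true
  else dfsLoop tree goal (1 + tree.length + (tree.map (fun p => p.2.length)).sum)
        PySem.Set.empty [start]

-- ===== PORT B =====
-- Source B's recursive visit (explored threaded through the recursion); dfsAny is the short-circuiting
-- 'any(visit(nb) for nb in reversed(tree[node]))'. The fuel bounds the recursion depth (each nested
-- visit call adds a fresh key to explored, so depth ≤ number of keys); it never runs out.
mutual
def dfsVisit (tree : List (String × List String)) (goal : String)
    (f : Nat) (E : PySem.Set String) (n : String) : Bool × PySem.Set String :=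
  if n == goal then (true, E)                            -- if node == goal: return True
  else if PySem.Set.contains E n then (false, E)         -- if node in explored: return False
  else
    match (PySem.Dict.mk tree).get? n with
    | none => (false, PySem.Set.add E n)                 -- explored.add(node); then tree[node] raises KeyError (outside Pre_dfs)
    | some ns =>
      match f with
      | 0 => (false, PySem.Set.add E n)                  -- fuel (never reached from dfs_alt, see pvVisit_irr)
      | f+1 => dfsAny tree goal f (PySem.Set.add E n) ns.reverse   -- explored.add(node); any(visit(nb) for nb in reversed(...))
termination_by (f, 0)

def dfsAny (tree : List (String × List String)) (goal : String)
    (f : Nat) (E : PySem.Set String) (l : List String) : Bool × PySem.Set String :=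
  match l with
  | [] => (false, E)
  | n :: rest =>
    let r := dfsVisit tree goal f E n
    if r.1 then r else dfsAny tree goal f r.2 rest
termination_by (f, l.length + 1)
end

def dfs_alt (tree : List (String × List String)) (start : String) (goal : String) : Bool :=
  (dfsVisit tree goal tree.length PySem.Set.empty start).1   -- return visit(start)

-- ===== PRECONDITION & SPEC =====
-- Pre_dfs marks where the Python A returns normally: either start == goal (A returns True at once),
-- or start and every listed neighbour (unless it equals goal) is a key — else A's 'tree[current]' can
-- raise KeyError. It over-approximates the raising inputs: A also returns when goal is popped before a
-- missing key (see the cite in claim.json). The Nodup conjunct only says the association list really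
-- represents a Python dict (distinct keys).
def Pre_dfs (tree : List (String × List String)) (start : String) (goal : String) : Prop :=
  (tree.map Prod.fst).Nodup ∧
  (start = goal ∨
    (((PySem.Dict.mk tree).get? start).isSome = true ∧
     ∀ p ∈ tree, ∀ n ∈ p.2, n = goal ∨ ((PySem.Dict.mk tree).get? n).isSome = true))
instance (tree : List (String × List String)) (start : String) (goal : String) : Decidable (Pre_dfs tree start goal) := by unfold Pre_dfs; infer_instance

def pvWitness_dfs : (List (String × List String)) × String × String :=
  ([("a", ["b"]), ("b", [])], "a", "b")

def Spec_dfs (tree : List (String × List String)) (start : String) (goal : String) (out : Bool) : Prop := out = dfs_alt tree start goal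
instance (tree : List (String × List String)) (start : String) (goal : String) (out : Bool) : Decidable (Spec_dfs tree start goal out) := by unfold Spec_dfs; infer_instance

-- ===== CLAIM (what is proved, stated in full; the proofs are below) =====
def Claim_equal_dfs : Prop := ∀ (tree : List (String × List String)) (start : String) (goal : String), Dom_dfs tree start goal → Pre_dfs tree start goal → Spec_dfs tree start goal (dfs tree start goal)

-- ===== LEMMAS AND PROOFS =====

-- number of keys not yet explored (bounds B's recursion depth)
def pvCount (tree : List (String × List String)) (E : PySem.Set String) : Nat :=
  ((tree.map Prod.fst).filter (fun k => decide (k ∉ E))).length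

-- total neighbour-list length of unexplored keys (with |stack| it bounds A's iteration count)
def pvW (tree : List (String × List String)) (E : PySem.Set String) : Nat :=
  ((tree.filter (fun p => decide (p.1 ∉ E))).map (fun p => p.2.length)).sum

-- canonical-fuel wrappers
def pvLoopC (tree : List (String × List String)) (goal : String)
    (E : PySem.Set String) (S : List String) : Bool :=
  dfsLoop tree goal (S.length + pvW tree E) E S

def pvAnyC (tree : List (String × List String)) (goal : String)
    (E : PySem.Set String) (l : List String) : Bool × PySem.Set String :=
  dfsAny tree goal (pvCount tree E) E l

theorem pvFilter_len_mono {α : Type} (l : List α) (p q : α → Bool)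
    (h : ∀ a, p a = true → q a = true) : (l.filter p).length ≤ (l.filter q).length := by
  induction l with
  | nil => simp
  | cons a t ih =>
    by_cases hp : p a = true
    · simp [List.filter, hp, h a hp]; omega
    · simp only [List.filter, hp]
      cases hq : q a <;> simp <;> omega

theorem pvFilter_sum_mono {α : Type} (l : List α) (g : α → Nat) (p q : α → Bool)
    (h : ∀ a, p a = true → q a = true) :
    ((l.filter p).map g).sum ≤ ((l.filter q).map g).sum := by
  induction l with
  | nil => simp
  | cons a t ih =>
    by_cases hp : p a = true
    · simp [List.filter, hp, h a hp]; omega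
    · simp only [List.filter, hp]
      cases hq : q a <;> simp <;> omega

theorem pvCount_mono (tree : List (String × List String)) (E E' : PySem.Set String)
    (h : ∀ a, a ∈ E → a ∈ E') : pvCount tree E' ≤ pvCount tree E := by
  unfold pvCount
  apply pvFilter_len_mono
  intro a ha
  simp only [decide_eq_true_eq] at ha ⊢
  exact fun hmem => ha (h _ hmem)

theorem pvW_mono (tree : List (String × List String)) (E E' : PySem.Set String)
    (h : ∀ a, a ∈ E → a ∈ E') : pvW tree E' ≤ pvW tree E := by
  unfold pvW
  apply pvFilter_sum_mono
  intro a ha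
  simp only [decide_eq_true_eq] at ha ⊢
  exact fun hmem => ha (h _ hmem)

theorem pvCount_pos (tree : List (String × List String)) (E : PySem.Set String) (c : String)
    (hk : ((PySem.Dict.mk tree).get? c).isSome = true) (hc : c ∉ E) :
    0 < pvCount tree E := by
  have hmem : c ∈ tree.map Prod.fst := by
    by_contra hnot
    have : (PySem.Dict.mk tree).get? c = none := by
      rw [PySem.Dict.get?_eq_none_iff_not_mem_keys]
      simpa using hnot
    simp [this] at hk
  have : c ∈ (tree.map Prod.fst).filter (fun k => decide (k ∉ E)) := by
    rw [List.mem_filter]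
    exact ⟨hmem, by simpa using hc⟩
  unfold pvCount
  exact List.length_pos_of_mem this

theorem pvCount_add_lt (tree : List (String × List String)) (E : PySem.Set String) (c : String)
    (hk : ((PySem.Dict.mk tree).get? c).isSome = true) (hc : c ∉ E) :
    pvCount tree (PySem.Set.add E c) < pvCount tree E := by
  have hmem : c ∈ tree.map Prod.fst := by
    by_contra hnot
    have : (PySem.Dict.mk tree).get? c = none := by
      rw [PySem.Dict.get?_eq_none_iff_not_mem_keys]
      simpa using hnot
    simp [this] at hk
  unfold pvCount
  have key : ∀ ks : List String, c ∈ ks →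
      (ks.filter (fun k => decide (k ∉ PySem.Set.add E c))).length <
      (ks.filter (fun k => decide (k ∉ E))).length := by
    intro ks hcks
    induction ks with
    | nil => simp at hcks
    | cons a t ih =>
      have hsub : ∀ k : String, (decide (k ∉ PySem.Set.add E c)) = true →
          (decide (k ∉ E)) = true := by
        intro k hkd
        simp only [decide_eq_true_eq, PySem.Set.mem_add] at hkd ⊢
        exact fun hkE => hkd (Or.inl hkE)
      by_cases hac : a = c
      · subst hac
        have h1 : (decide (a ∉ PySem.Set.add E a)) = false := by
          simp [PySem.Set.mem_add]
        have h2 : (decide (a ∉ E)) = true := by simpa using hc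
        simp only [List.filter, h1, h2, List.length_cons]
        have := pvFilter_len_mono t _ _ hsub
        omega
      · have ht : c ∈ t := by
          cases List.mem_cons.mp hcks with
          | inl h => exact absurd h.symm hac
          | inr h => exact h
        have heq : (decide (a ∉ PySem.Set.add E c)) = (decide (a ∉ E)) := by
          simp only [PySem.Set.mem_add]
          by_cases haE : a ∈ E <;> simp [haE, hac]
        simp only [List.filter, heq]
        cases decide (a ∉ E) <;> simp only [] <;>
          [exact ih ht; simpa using Nat.succ_lt_succ (ih ht)]
  exact key _ hmem

theorem pvW_add (tree : List (String × List String)) (E : PySem.Set String) (c : String)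
    (ns : List String) (hk : (PySem.Dict.mk tree).get? c = some ns) (hc : c ∉ E) :
    pvW tree (PySem.Set.add E c) + ns.length ≤ pvW tree E := by
  induction tree with
  | nil => simp [PySem.Dict.get?] at hk
  | cons p t ih =>
    obtain ⟨k, l⟩ := p
    rw [PySem.Dict.get?_mk_cons] at hk
    by_cases hkc : k = c
    · subst hkc
      simp only [beq_self_eq_true, if_pos] at hk
      injection hk with hk; subst hk
      have h1 : (decide (k ∉ PySem.Set.add E k)) = false := by
        simp [PySem.Set.mem_add]
      have h2 : (decide (k ∉ E)) = true := by simpa using hc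
      simp only [pvW, List.filter, h1, h2, List.map, List.sum_cons]
      have := pvW_mono t E (PySem.Set.add E k)
        (fun a ha => by rw [PySem.Set.mem_add]; exact Or.inl ha)
      unfold pvW at this
      omega
    · rw [if_neg (by simpa using fun h => hkc h)] at hk
      have heq : (decide (k ∉ PySem.Set.add E c)) = (decide (k ∉ E)) := by
        simp only [PySem.Set.mem_add]
        by_cases hkE : k ∈ E <;> simp [hkE, hkc]
      have := ih hk
      unfold pvW at this ⊢
      simp only [List.filter, heq]
      cases decide (k ∉ E) <;> simp only []
      · exact this
      · simp only [List.map, List.sum_cons]; omega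

-- A-side: the loop's value does not depend on the fuel once it covers |stack| + pvW
theorem pvLoop_irr (tree : List (String × List String)) (goal : String) :
    ∀ f g E S, S.length + pvW tree E ≤ f → S.length + pvW tree E ≤ g →
      dfsLoop tree goal f E S = dfsLoop tree goal g E S := by
  intro f
  induction f with
  | zero =>
    intro g E S h1 h2
    cases S with
    | nil => cases g <;> simp [dfsLoop]
    | cons c S' => simp at h1
  | succ f ih =>
    intro g E S h1 h2
    cases S with
    | nil => cases g <;> simp [dfsLoop]
    | cons c S' =>
      cases g with
      | zero => simp at h2
      | succ g' =>
        simp only [dfsLoop]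
        by_cases hcE : PySem.Set.contains E c = true
        · simp only [hcE, if_pos]
          exact ih g' E S' (by simp at h1 ⊢; omega) (by simp at h2 ⊢; omega)
        · simp only [hcE, Bool.false_eq_true, if_neg, not_false_eq_true]
          by_cases hcg : (c == goal) = true
          · simp [hcg]
          · simp only [hcg, Bool.false_eq_true, if_neg, not_false_eq_true,
              Bool.not_false, if_pos]
            have hcEm : c ∉ E := by
              simpa [PySem.Set.contains_iff] using hcE
            have hbound : (((PySem.Dict.mk tree).getD c []).reverse ++ S').length +
                pvW tree (PySem.Set.add E c) ≤ S'.length + pvW tree E := by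
              cases hg : (PySem.Dict.mk tree).get? c with
              | none =>
                have hgd : (PySem.Dict.mk tree).getD c [] = [] :=
                  PySem.Dict.getD_of_get?_eq_none _ _ hg
                have := pvW_mono tree E (PySem.Set.add E c)
                  (fun a ha => by rw [PySem.Set.mem_add]; exact Or.inl ha)
                simp [hgd]; omega
              | some ns =>
                have hgd : (PySem.Dict.mk tree).getD c [] = ns :=
                  PySem.Dict.getD_of_get?_eq_some _ _ hg
                have := pvW_add tree E c ns hg hcEm
                simp [hgd]; omega
            apply ih
            · simp at h1; omega
            · simp at h2; omega

-- B-side: explored only grows, and goal is never inserted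
theorem pvB_mono (tree : List (String × List String)) (goal : String) :
    ∀ f, (∀ E n, (∀ a, a ∈ E → a ∈ (dfsVisit tree goal f E n).2) ∧
                 (goal ∉ E → goal ∉ (dfsVisit tree goal f E n).2)) ∧
         (∀ l E, (∀ a, a ∈ E → a ∈ (dfsAny tree goal f E l).2) ∧
                 (goal ∉ E → goal ∉ (dfsAny tree goal f E l).2)) := by
  have haddmem : ∀ (E : PySem.Set String) (n a : String), a ∈ E → a ∈ PySem.Set.add E n := by
    intro E n a ha; rw [PySem.Set.mem_add]; exact Or.inl ha
  have haddgoal : ∀ (E : PySem.Set String) (n : String), ¬(n == goal) = true →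
      goal ∉ E → goal ∉ PySem.Set.add E n := by
    intro E n hne hE hmem
    rw [PySem.Set.mem_add] at hmem
    cases hmem with
    | inl h => exact hE h
    | inr h => exact hne (by simp [h.symm])
  intro f
  induction f with
  | zero =>
    have hv : ∀ E n, (∀ a, a ∈ E → a ∈ (dfsVisit tree goal 0 E n).2) ∧
        (goal ∉ E → goal ∉ (dfsVisit tree goal 0 E n).2) := by
      intro E n
      rw [dfsVisit]
      by_cases h1 : (n == goal) = true
      · simp [h1]
      · by_cases h2 : PySem.Set.contains E n = true
        · have h2m : n ∈ E := by simpa [PySem.Set.contains_iff] using h2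
          simp [h1, h2m]
        · cases hg : (PySem.Dict.mk tree).get? n with
          | none =>
            simp only [h1, h2, Bool.false_eq_true, if_neg, not_false_eq_true]
            exact ⟨fun a ha => haddmem E n a ha, fun hE => haddgoal E n h1 hE⟩
          | some ns =>
            simp only [h1, h2, Bool.false_eq_true, if_neg, not_false_eq_true]
            exact ⟨fun a ha => haddmem E n a ha, fun hE => haddgoal E n h1 hE⟩
    refine ⟨hv, ?_⟩
    intro l
    induction l with
    | nil => intro E; rw [dfsAny]; exact ⟨fun a ha => ha, fun h => h⟩
    | cons n rest ihl =>
      intro E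
      rw [dfsAny]
      by_cases hr : (dfsVisit tree goal 0 E n).1 = true
      · simp only [hr, if_pos]
        exact (hv E n)
      · simp only [hr, Bool.false_eq_true, if_neg, not_false_eq_true]
        constructor
        · intro a ha
          exact (ihl _).1 a ((hv E n).1 a ha)
        · intro hE
          exact (ihl _).2 ((hv E n).2 hE)
  | succ f ih =>
    have hv : ∀ E n, (∀ a, a ∈ E → a ∈ (dfsVisit tree goal (f+1) E n).2) ∧
        (goal ∉ E → goal ∉ (dfsVisit tree goal (f+1) E n).2) := by
      intro E n
      rw [dfsVisit]
      by_cases h1 : (n == goal) = true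
      · simp [h1]
      · by_cases h2 : PySem.Set.contains E n = true
        · have h2m : n ∈ E := by simpa [PySem.Set.contains_iff] using h2
          simp [h1, h2m]
        · cases hg : (PySem.Dict.mk tree).get? n with
          | none =>
            simp only [h1, h2, Bool.false_eq_true, if_neg, not_false_eq_true]
            exact ⟨fun a ha => haddmem E n a ha, fun hE => haddgoal E n h1 hE⟩
          | some ns =>
            simp only [h1, h2, Bool.false_eq_true, if_neg, not_false_eq_true]
            constructor
            · intro a ha
              exact (ih.2 ns.reverse (PySem.Set.add E n)).1 a (haddmem E n a ha)
            · intro hE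
              exact (ih.2 ns.reverse (PySem.Set.add E n)).2 (haddgoal E n h1 hE)
    refine ⟨hv, ?_⟩
    intro l
    induction l with
    | nil => intro E; rw [dfsAny]; exact ⟨fun a ha => ha, fun h => h⟩
    | cons n rest ihl =>
      intro E
      rw [dfsAny]
      by_cases hr : (dfsVisit tree goal (f+1) E n).1 = true
      · simp only [hr, if_pos]
        exact (hv E n)
      · simp only [hr, Bool.false_eq_true, if_neg, not_false_eq_true]
        constructor
        · intro a ha
          exact (ihl _).1 a ((hv E n).1 a ha)
        · intro hE
          exact (ihl _).2 ((hv E n).2 hE)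

-- B-side: the result does not depend on the fuel once it covers pvCount
theorem pvB_irr (tree : List (String × List String)) (goal : String) :
    ∀ f, (∀ g E n, pvCount tree E ≤ f → pvCount tree E ≤ g →
            dfsVisit tree goal f E n = dfsVisit tree goal g E n) ∧
         (∀ l g E, pvCount tree E ≤ f → pvCount tree E ≤ g →
            dfsAny tree goal f E l = dfsAny tree goal g E l) := by
  intro f
  induction f with
  | zero =>
    have hv : ∀ g E n, pvCount tree E ≤ 0 → pvCount tree E ≤ g →
        dfsVisit tree goal 0 E n = dfsVisit tree goal g E n := by
      intro g E n h0 hgc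
      rw [dfsVisit]
      conv_rhs => rw [dfsVisit]
      by_cases h1 : (n == goal) = true
      · simp [h1]
      · by_cases h2 : PySem.Set.contains E n = true
        · have h2m : n ∈ E := by simpa [PySem.Set.contains_iff] using h2
          simp [h1, h2m]
        · have h2m : n ∉ E := by simpa [PySem.Set.contains_iff] using h2
          cases hg : (PySem.Dict.mk tree).get? n with
          | none => simp [h1, h2m]
          | some ns =>
            exact absurd (pvCount_pos tree E n (by simp [hg]) h2m) (by omega)
    refine ⟨hv, ?_⟩
    intro l
    induction l with
    | nil => intro g E _ _; rw [dfsAny]; conv_rhs => rw [dfsAny]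
    | cons n rest ihl =>
      intro g E h0 hgc
      rw [dfsAny]
      conv_rhs => rw [dfsAny]
      rw [← hv g E n h0 hgc]
      by_cases hr : (dfsVisit tree goal 0 E n).1 = true
      · simp [hr]
      · simp only [hr, Bool.false_eq_true, if_neg, not_false_eq_true]
        apply ihl
        · exact le_trans (pvCount_mono tree E _ ((pvB_mono tree goal 0).1 E n).1) h0
        · exact le_trans (pvCount_mono tree E _ ((pvB_mono tree goal 0).1 E n).1) hgc
  | succ f ih =>
    have hv : ∀ g E n, pvCount tree E ≤ f + 1 → pvCount tree E ≤ g →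
        dfsVisit tree goal (f+1) E n = dfsVisit tree goal g E n := by
      intro g E n h0 hgc
      rw [dfsVisit]
      conv_rhs => rw [dfsVisit]
      by_cases h1 : (n == goal) = true
      · simp [h1]
      · by_cases h2 : PySem.Set.contains E n = true
        · have h2m : n ∈ E := by simpa [PySem.Set.contains_iff] using h2
          simp [h1, h2m]
        · have h2m : n ∉ E := by simpa [PySem.Set.contains_iff] using h2
          cases hg : (PySem.Dict.mk tree).get? n with
          | none => simp [h1, h2m]
          | some ns =>
            have hpos : 0 < pvCount tree E := pvCount_pos tree E n (by simp [hg]) h2m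
            cases g with
            | zero => omega
            | succ g' =>
              simp only [if_neg h1, if_neg h2]
              have hlt := pvCount_add_lt tree E n (by simp [hg]) h2m
              exact ih.2 ns.reverse g' (PySem.Set.add E n) (by omega) (by omega)
    refine ⟨hv, ?_⟩
    intro l
    induction l with
    | nil => intro g E _ _; rw [dfsAny]; conv_rhs => rw [dfsAny]
    | cons n rest ihl =>
      intro g E h0 hgc
      rw [dfsAny]
      conv_rhs => rw [dfsAny]
      rw [← hv g E n h0 hgc]
      by_cases hr : (dfsVisit tree goal (f+1) E n).1 = true
      · simp [hr]
      · simp only [hr, Bool.false_eq_true, if_neg, not_false_eq_true]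
        apply ihl
        · exact le_trans (pvCount_mono tree E _ ((pvB_mono tree goal (f+1)).1 E n).1) h0
        · exact le_trans (pvCount_mono tree E _ ((pvB_mono tree goal (f+1)).1 E n).1) hgc

-- Main simulation: the stack machine on L1 ++ L2 is the recursive sweep of L1 followed by the machine on L2
theorem pvMain (tree : List (String × List String)) (goal : String) :
    ∀ N E, pvCount tree E ≤ N → ∀ L1 L2, goal ∉ E →
      pvLoopC tree goal E (L1 ++ L2) =
        (if (pvAnyC tree goal E L1).1 then true
         else pvLoopC tree goal (pvAnyC tree goal E L1).2 L2) := by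
  intro N
  induction N using Nat.strong_induction_on with
  | _ N ihN =>
  have inner : ∀ L1 E, pvCount tree E ≤ N → ∀ L2, goal ∉ E →
      pvLoopC tree goal E (L1 ++ L2) =
        (if (pvAnyC tree goal E L1).1 then true
         else pvLoopC tree goal (pvAnyC tree goal E L1).2 L2) := by
    intro L1
    induction L1 with
    | nil =>
      intro E hNE L2 hgE
      simp only [List.nil_append, pvAnyC]
      rw [dfsAny]
      simp
    | cons c L1' ihl =>
      intro E hNE L2 hgE
      have hlhs : pvLoopC tree goal E ((c :: L1') ++ L2) =
          dfsLoop tree goal (((L1' ++ L2).length + pvW tree E) + 1) E (c :: (L1' ++ L2)) := by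
        unfold pvLoopC
        simp only [List.cons_append, List.length_cons]
        congr 1
        omega
      by_cases hcE : PySem.Set.contains E c = true
      · -- current in explored_set: the loop skips, visit returns (False, explored)
        have hcmem : c ∈ E := by simpa [PySem.Set.contains_iff] using hcE
        have hcg : (c == goal) = false := by
          apply beq_eq_false_iff_ne.mpr
          intro h; exact hgE (h ▸ hcmem)
        have hAny : pvAnyC tree goal E (c :: L1') = pvAnyC tree goal E L1' := by
          unfold pvAnyC
          rw [dfsAny, dfsVisit]
          simp [hcg, hcmem]
        rw [hlhs, dfsLoop, if_pos hcE, hAny]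
        exact ihl E hNE L2 hgE
      · have hcmemn : c ∉ E := by simpa [PySem.Set.contains_iff] using hcE
        by_cases hcg : (c == goal) = true
        · -- current == goal: both sides return True
          have hAny : pvAnyC tree goal E (c :: L1') = (true, E) := by
            unfold pvAnyC
            rw [dfsAny, dfsVisit]
            simp [hcg]
          rw [hlhs, dfsLoop, if_neg hcE, if_pos hcg, hAny]
          simp
        · -- expand c
          have hE2g : goal ∉ PySem.Set.add E c := by
            intro hmem
            rw [PySem.Set.mem_add] at hmem
            cases hmem with
            | inl h => exact hgE h
            | inr h => exact hcg (by simp [h.symm])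
          have hE2sub : ∀ a, a ∈ E → a ∈ PySem.Set.add E c := by
            intro a ha; rw [PySem.Set.mem_add]; exact Or.inl ha
          cases hg : (PySem.Dict.mk tree).get? c with
          | none =>
            -- no such key: 'tree[current]' would raise in Python (outside Pre_); the ports add c and go on
            have hgd : (PySem.Dict.mk tree).getD c [] = [] :=
              PySem.Dict.getD_of_get?_eq_none _ _ hg
            have hcnt2 : pvCount tree (PySem.Set.add E c) ≤ N :=
              le_trans (pvCount_mono tree E _ hE2sub) hNE
            have hAny : pvAnyC tree goal E (c :: L1') =
                pvAnyC tree goal (PySem.Set.add E c) L1' := by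
              unfold pvAnyC
              rw [dfsAny, dfsVisit]
              simp only [hcg, Bool.false_eq_true, if_neg, not_false_eq_true, if_neg hcE, hg]
              apply (pvB_irr tree goal (pvCount tree E)).2
              · exact le_trans (pvCount_mono tree E _ hE2sub) (le_refl _)
              · exact le_refl _
            rw [hlhs, dfsLoop, if_neg hcE, if_neg hcg, if_pos (show (!PySem.Set.contains E c) = true by simp [hcmemn]), hgd]
            simp only [List.reverse_nil, List.nil_append]
            have hstep : dfsLoop tree goal ((L1' ++ L2).length + pvW tree E)
                (PySem.Set.add E c) (L1' ++ L2) =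
                pvLoopC tree goal (PySem.Set.add E c) (L1' ++ L2) :=
              pvLoop_irr tree goal _ _ (PySem.Set.add E c) (L1' ++ L2)
                (by have := pvW_mono tree E _ hE2sub; omega) (le_refl _)
            rw [hstep, hAny]
            exact ihl (PySem.Set.add E c) hcnt2 L2 hE2g
          | some ns =>
            have hcpos : 0 < pvCount tree E := pvCount_pos tree E c (by simp [hg]) hcmemn
            have hclt : pvCount tree (PySem.Set.add E c) < pvCount tree E :=
              pvCount_add_lt tree E c (by simp [hg]) hcmemn
            have hgd : (PySem.Dict.mk tree).getD c [] = ns :=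
              PySem.Dict.getD_of_get?_eq_some _ _ hg
            obtain ⟨k, hk⟩ : ∃ k, pvCount tree E = k + 1 := ⟨pvCount tree E - 1, by omega⟩
            -- LHS: one loop step, then canonical fuel
            rw [hlhs, dfsLoop, if_neg hcE, if_neg hcg, if_pos (show (!PySem.Set.contains E c) = true by simp [hcmemn]), hgd]
            have hWadd := pvW_add tree E c ns hg hcmemn
            have hstep : dfsLoop tree goal ((L1' ++ L2).length + pvW tree E)
                (PySem.Set.add E c) (ns.reverse ++ (L1' ++ L2)) =
                pvLoopC tree goal (PySem.Set.add E c) (ns.reverse ++ (L1' ++ L2)) :=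
              pvLoop_irr tree goal _ _ (PySem.Set.add E c) (ns.reverse ++ (L1' ++ L2))
                (by simp; omega) (le_refl _)
            rw [hstep]
            -- first simulation step: the pushed neighbours
            have h1 := ihN (pvCount tree (PySem.Set.add E c)) (by omega)
              (PySem.Set.add E c) (le_refl _) ns.reverse (L1' ++ L2) hE2g
            rw [h1]
            -- RHS: unfold one visit
            have hE3g : goal ∉ (pvAnyC tree goal (PySem.Set.add E c) ns.reverse).2 :=
              ((pvB_mono tree goal (pvCount tree (PySem.Set.add E c))).2 ns.reverse _).2 hE2g
            have hvis : dfsVisit tree goal (pvCount tree E) E c =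
                pvAnyC tree goal (PySem.Set.add E c) ns.reverse := by
              rw [hk, dfsVisit]
              simp only [hcg, Bool.false_eq_true, if_neg, not_false_eq_true, if_neg hcE, hg]
              apply (pvB_irr tree goal k).2
              · omega
              · exact le_refl _
            have hE3sub : ∀ a, a ∈ E → a ∈ (pvAnyC tree goal (PySem.Set.add E c) ns.reverse).2 := by
              intro a ha
              exact ((pvB_mono tree goal (pvCount tree (PySem.Set.add E c))).2 ns.reverse _).1 a (hE2sub a ha)
            have hcnt3 : pvCount tree (pvAnyC tree goal (PySem.Set.add E c) ns.reverse).2 ≤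
                pvCount tree E :=
              pvCount_mono tree E _ hE3sub
            have htail : dfsAny tree goal (pvCount tree E)
                  (pvAnyC tree goal (PySem.Set.add E c) ns.reverse).2 L1' =
                pvAnyC tree goal (pvAnyC tree goal (PySem.Set.add E c) ns.reverse).2 L1' :=
              (pvB_irr tree goal (pvCount tree E)).2 L1' _ _ hcnt3 (le_refl _)
            have hAny : pvAnyC tree goal E (c :: L1') =
                (if (pvAnyC tree goal (PySem.Set.add E c) ns.reverse).1 = true then
                   pvAnyC tree goal (PySem.Set.add E c) ns.reverse
                 else pvAnyC tree goal (pvAnyC tree goal (PySem.Set.add E c) ns.reverse).2 L1') := by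
              show dfsAny tree goal (pvCount tree E) E (c :: L1') = _
              rw [dfsAny]
              simp only [hvis]
              by_cases hb : (pvAnyC tree goal (PySem.Set.add E c) ns.reverse).1 = true
              · rw [if_pos hb, if_pos hb]
              · rw [if_neg hb, if_neg hb, htail]
            have hcnt32 : pvCount tree (pvAnyC tree goal (PySem.Set.add E c) ns.reverse).2 ≤
                pvCount tree (PySem.Set.add E c) :=
              pvCount_mono tree _ _
                (fun a ha => ((pvB_mono tree goal (pvCount tree (PySem.Set.add E c))).2 ns.reverse _).1 a ha)
            rw [hAny]
            by_cases hb : (pvAnyC tree goal (PySem.Set.add E c) ns.reverse).1 = true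
            · simp [hb]
            · simp only [hb, Bool.false_eq_true, if_neg, not_false_eq_true]
              exact ihN (pvCount tree (pvAnyC tree goal (PySem.Set.add E c) ns.reverse).2)
                (by omega) _ (le_refl _) L1' L2 hE3g
  intro E hNE L1 L2 hgE
  exact inner L1 E hNE L2 hgE

-- ===== VERDICT (by name: the statement is the Claim_ definition above) =====
theorem dfs_spec : Claim_equal_dfs := by
  intro tree start goal hdom hpre
  unfold Spec_dfs dfs dfs_alt
  by_cases hsg : (start == goal) = true
  · rw [if_pos hsg, dfsVisit, if_pos hsg]
  · rw [if_neg hsg]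
    have hW0 : pvW tree PySem.Set.empty = (tree.map (fun p => p.2.length)).sum := by
      unfold pvW
      have : tree.filter (fun p => decide (p.1 ∉ (PySem.Set.empty : PySem.Set String))) = tree := by
        apply List.filter_eq_self.mpr
        intro a _
        simp [PySem.Set.empty]
      rw [this]
    have hC0 : pvCount tree PySem.Set.empty = tree.length := by
      unfold pvCount
      have : (tree.map Prod.fst).filter (fun k => decide (k ∉ (PySem.Set.empty : PySem.Set String))) = tree.map Prod.fst := by
        apply List.filter_eq_self.mpr
        intro a _
        simp [PySem.Set.empty]
      rw [this, List.length_map]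
    have hg0 : goal ∉ (PySem.Set.empty : PySem.Set String) := by
      simp [PySem.Set.empty]
    have h1 : dfsLoop tree goal (1 + tree.length + (tree.map (fun p => p.2.length)).sum)
        PySem.Set.empty [start] = pvLoopC tree goal PySem.Set.empty [start] :=
      pvLoop_irr tree goal _ _ PySem.Set.empty [start]
        (by rw [hW0]; simp only [List.length_cons, List.length_nil]; omega) (le_refl _)
    rw [h1]
    have h2 := pvMain tree goal (pvCount tree PySem.Set.empty) PySem.Set.empty (le_refl _)
      [start] [] hg0
    rw [List.append_nil] at h2
    rw [h2]
    have hrr : pvAnyC tree goal PySem.Set.empty [start] =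
        (if (dfsVisit tree goal tree.length PySem.Set.empty start).1 = true then
           dfsVisit tree goal tree.length PySem.Set.empty start
         else (false, (dfsVisit tree goal tree.length PySem.Set.empty start).2)) := by
      show dfsAny tree goal (pvCount tree PySem.Set.empty) PySem.Set.empty [start] = _
      rw [hC0, dfsAny]
      by_cases hr : (dfsVisit tree goal tree.length PySem.Set.empty start).1 = true
      · rw [if_pos hr, if_pos hr]
      · rw [if_neg hr, if_neg hr, dfsAny]
    have loopnil : ∀ (f : Nat) (E' : PySem.Set String), dfsLoop tree goal f E' [] = false := by
      intro f E'
      cases f <;> simp [dfsLoop]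
    by_cases hr : (dfsVisit tree goal tree.length PySem.Set.empty start).1 = true
    · have hcond : (pvAnyC tree goal PySem.Set.empty [start]).1 = true := by
        rw [hrr, if_pos hr]; exact hr
      rw [if_pos hcond]
      exact hr.symm
    · have hrf : (dfsVisit tree goal tree.length PySem.Set.empty start).1 = false :=
        Bool.not_eq_true _ |>.mp hr
      have hcond : (pvAnyC tree goal PySem.Set.empty [start]).1 = false := by
        rw [hrr, if_neg hr]
      rw [if_neg (by rw [hcond]; exact Bool.false_ne_true)]
      show dfsLoop tree goal _ _ [] = _
      rw [loopnil]
      exact hrf.symm
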